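-- pv_equiv track=rewrite | github.com/Swiftyfish/codechef | codeforces/sept20/array_restoration.py | get_array
-- ===== SOURCE A (Python) =====
-- def get_array(n, x, y):
--     if n > 2:
--         diff = y - x
--         n_spacings = n - 1
--         if diff % n_spacings == 0:
--             diff_elems = diff//n_spacings
--             return [x] + [x + diff_elems*(i+1) for i in range(n - 2)] + [y]
--         else:
--             #y is not at the end of the list
--             for i in range(2, diff):
--                 if diff % i == 0 and diff//i < n - 1:
--                     diff = i
--                     break
--             # now have new divisor, link x and y then decrease from x
--             inner_list = [x + diff*i for i in range(n)]
--             shift = min(inner_list) // diff - 1*(x % diff == 0)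
--             if shift:
--                 return [i - diff*shift for i in inner_list]
--
--             return inner_list
--     else:
--         return [x, y]
-- ===== SOURCE B (Python) =====
-- def get_array(n, x, y):
--     if n <= 2:
--         return [x, y]
--     diff = y - x
--     if diff % (n - 1) == 0:
--         step = diff // (n - 1)
--         return [x + step * i for i in range(n)]
--     # smallest divisor d >= 2 of diff that needs fewer than n - 1 steps to span diff,
--     # found by enumerating divisor pairs up to sqrt(diff); fall back to diff itself
--     d = diff
--     divisors = set()
--     s = 1
--     while s * s <= diff:
--         if diff % s == 0:
--             divisors.add(s)
--             divisors.add(diff // s)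
--         s += 1
--     for c in sorted(divisors):
--         if 2 <= c < diff and diff // c < n - 1:
--             d = c
--             break
--     # arithmetic progression with step d starting at the smallest positive value congruent to x mod d
--     start = (x - 1) % d + 1
--     return [start + d * i for i in range(n)]
-- ===== Notes on version B (the rewrite author's own statement) =====
-- stated objective: faster
-- what changed: B finds the qualifying divisor of diff by enumerating divisor pairs up to sqrt(diff) instead of A's linear scan over range(2, diff), and emits the progression directly from its smallest positive starting value (x-1)%d+1 instead of A's build-then-min-then-shift of an intermediate list; Pre_ excludes the reversed inputs y < x (with n > 2 and y-x not divisible by n-1), an unspecified corner of the 'restore an increasing array between x and y' task where A's min()-based shift of a decreasing progression and B's positive-start progression are both accidental choices.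
-- outside the precondition, e.g. on get_array(3, 5, 2): A returns [5, 2, -1], B returns [-1, -4, -7]
import Mathlib
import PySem

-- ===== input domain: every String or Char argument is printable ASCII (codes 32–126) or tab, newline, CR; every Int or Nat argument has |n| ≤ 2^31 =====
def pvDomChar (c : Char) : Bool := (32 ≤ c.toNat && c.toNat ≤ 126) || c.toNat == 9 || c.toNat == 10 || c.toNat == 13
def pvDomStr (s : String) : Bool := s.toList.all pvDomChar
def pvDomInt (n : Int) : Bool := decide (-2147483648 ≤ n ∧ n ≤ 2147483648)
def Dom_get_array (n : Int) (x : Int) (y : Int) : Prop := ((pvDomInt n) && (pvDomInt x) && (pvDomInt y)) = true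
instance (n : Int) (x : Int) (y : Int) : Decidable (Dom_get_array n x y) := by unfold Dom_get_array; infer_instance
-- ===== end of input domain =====

-- B finds the qualifying divisor by enumerating divisor pairs up to sqrt(diff) instead of
-- A's linear scan over range(2, diff), and emits the progression from its smallest positive
-- start instead of A's build-then-min-then-shift of an intermediate list.

-- ===== PORT A =====
-- the for-loop 'for i in range(2, diff): if …: diff = i; break' (first hit, or diff unchanged)
def aFind (diff n : Int) : List Int → Int
  | [] => diff
  | i :: rest =>
    if PySem.Int.mod diff i = 0 ∧ PySem.Int.floordiv diff i < n - 1 then i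
    else aFind diff n rest

def get_array (n : Int) (x : Int) (y : Int) : List Int :=
  if n > 2 then
    let diff := y - x
    let n_spacings := n - 1
    if PySem.Int.mod diff n_spacings = 0 then
      let diff_elems := PySem.Int.floordiv diff n_spacings
      [x] ++ (PySem.List.pyRange 0 (n - 2)).map (fun i => x + diff_elems * (i + 1)) ++ [y]
    else
      let diff2 := aFind diff n (PySem.List.pyRange 2 diff)
      let inner := (PySem.List.pyRange 0 n).map (fun i => x + diff2 * i)
      -- min(inner_list): inner is nonempty here (n > 2), so Python's min cannot raise
      let m := (PySem.List.min? inner (fun v => v)).getD 0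
      let shift := PySem.Int.floordiv m diff2 - (if PySem.Int.mod x diff2 = 0 then 1 else 0)
      if shift ≠ 0 then inner.map (fun v => v - diff2 * shift) else inner
  else [x, y]

-- ===== PORT B =====
-- 'while s * s <= diff: if diff % s == 0: divisors.add(s); divisors.add(diff // s); s += 1'
def bDivs (diff s : Int) (acc : PySem.Set Int) : PySem.Set Int :=
  if s * s ≤ diff then
    bDivs diff (s + 1)
      (if PySem.Int.mod diff s = 0 then
        PySem.Set.add (PySem.Set.add acc s) (PySem.Int.floordiv diff s)
      else acc)
  else acc
termination_by (diff + 1 - s).toNat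
decreasing_by
  have hs : s ≤ diff := by nlinarith
  omega

-- 'for c in sorted(divisors): if 2 <= c < diff and diff // c < n - 1: d = c; break'
def bFind (diff n : Int) : List Int → Int
  | [] => diff
  | c :: rest =>
    if 2 ≤ c ∧ c < diff ∧ PySem.Int.floordiv diff c < n - 1 then c
    else bFind diff n rest

def get_array_alt (n : Int) (x : Int) (y : Int) : List Int :=
  if n ≤ 2 then [x, y]
  else
    let diff := y - x
    if PySem.Int.mod diff (n - 1) = 0 then
      let step := PySem.Int.floordiv diff (n - 1)
      (PySem.List.pyRange 0 n).map (fun i => x + step * i)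
    else
      let d := bFind diff n (PySem.List.sorted (bDivs diff 1 PySem.Set.empty) (fun v => v) false)
      let start := PySem.Int.mod (x - 1) d + 1
      (PySem.List.pyRange 0 n).map (fun i => start + d * i)

-- ===== PRECONDITION & SPEC =====
-- Pre_ excludes the reversed inputs y < x (with n > 2 and y - x not divisible by n - 1): the
-- task 'restore an increasing array between x and y' is unspecified there, and A's
-- min()-based shift of a decreasing progression and B's positive-start progression are both
-- accidental choices for that corner.
def Pre_get_array (n : Int) (x : Int) (y : Int) : Prop :=
  n ≤ 2 ∨ x ≤ y ∨ PySem.Int.mod (y - x) (n - 1) = 0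
instance (n : Int) (x : Int) (y : Int) : Decidable (Pre_get_array n x y) := by
  unfold Pre_get_array; infer_instance

def pvWitness_get_array : Int × Int × Int := (4, 1, 7)

def Spec_get_array (n : Int) (x : Int) (y : Int) (out : List Int) : Prop := out = get_array_alt n x y
instance (n : Int) (x : Int) (y : Int) (out : List Int) : Decidable (Spec_get_array n x y out) := by unfold Spec_get_array; infer_instance

-- ===== CLAIM (what is proved, stated in full; the proofs are below) =====
def Claim_equal_get_array : Prop := ∀ (n : Int) (x : Int) (y : Int), Dom_get_array n x y → Pre_get_array n x y → Spec_get_array n x y (get_array n x y)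

-- ===== LEMMAS AND PROOFS =====

theorem aFind_eq_find? (diff n : Int) (l : List Int) :
    aFind diff n l =
      (l.find? (fun i => decide (PySem.Int.mod diff i = 0 ∧ PySem.Int.floordiv diff i < n - 1))).getD diff := by
  induction l with
  | nil => rfl
  | cons i rest ih =>
    simp only [aFind, List.find?_cons]
    by_cases h : PySem.Int.mod diff i = 0 ∧ PySem.Int.floordiv diff i < n - 1
    · simp [h]
    · simp [h, ih]

theorem bFind_eq_find? (diff n : Int) (l : List Int) :
    bFind diff n l =
      (l.find? (fun c => decide (2 ≤ c ∧ c < diff ∧ PySem.Int.floordiv diff c < n - 1))).getD diff := by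
  induction l with
  | nil => rfl
  | cons c rest ih =>
    simp only [bFind, List.find?_cons]
    by_cases h : 2 ≤ c ∧ c < diff ∧ PySem.Int.floordiv diff c < n - 1
    · simp [h]
    · simp [h, ih]

theorem asc_ext (l1 l2 : List Int) (h1 : l1.Pairwise (· < ·)) (h2 : l2.Pairwise (· < ·))
    (h : ∀ c, c ∈ l1 ↔ c ∈ l2) : l1 = l2 := by
  have n1 : l1.Nodup := h1.nodup
  have n2 : l2.Nodup := h2.nodup
  have hp : l1.Perm l2 := by
    apply List.perm_of_nodup_nodup_toFinset_eq n1 n2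
    ext c; simp [List.mem_toFinset, h c]
  exact hp.eq_of_pairwise (fun a b _ _ hab hba => absurd hab (not_lt.mpr hba.le)) h1 h2

theorem nodup_bDivs (diff s : Int) (acc : PySem.Set Int) (hacc : acc.Nodup) :
    (bDivs diff s acc).Nodup := by
  induction s, acc using bDivs.induct diff with
  | case1 s acc h ih =>
    rw [bDivs, if_pos h]
    by_cases hd : PySem.Int.mod diff s = 0
    · rw [dif_pos hd] at ih
      rw [if_pos hd]
      exact ih (PySem.Set.nodup_add _ _ (PySem.Set.nodup_add _ _ hacc))
    · rw [dif_neg hd] at ih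
      rw [if_neg hd]
      exact ih hacc
  | case2 s acc h => rw [bDivs, if_neg h]; exact hacc

theorem mem_bDivs (diff s : Int) (acc : PySem.Set Int) (c : Int) (hs : 1 ≤ s) :
    c ∈ bDivs diff s acc ↔
      c ∈ acc ∨ ∃ t, s ≤ t ∧ t * t ≤ diff ∧ t ∣ diff ∧ (c = t ∨ c = PySem.Int.floordiv diff t) := by
  induction s, acc using bDivs.induct diff with
  | case1 s acc h ih =>
    rw [bDivs, if_pos h]
    rw [show (bDivs diff (s+1) (if PySem.Int.mod diff s = 0 then (acc.add s).add (PySem.Int.floordiv diff s) else acc)) = bDivs diff (s+1) (if h : PySem.Int.mod diff s = 0 then (acc.add s).add (PySem.Int.floordiv diff s) else acc) by simp]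
    rw [ih (by omega)]
    constructor
    · rintro (hm | ⟨t, ht1, ht2, ht3, ht4⟩)
      · split at hm
        · rename_i hdvd
          rw [PySem.Set.mem_add, PySem.Set.mem_add] at hm
          rcases hm with (hm | rfl) | rfl
          · exact Or.inl hm
          · exact Or.inr ⟨c, le_refl _, h, (PySem.Int.mod_eq_zero_iff_dvd _ _).mp hdvd, Or.inl rfl⟩
          · exact Or.inr ⟨s, le_refl _, h, (PySem.Int.mod_eq_zero_iff_dvd _ _).mp hdvd, Or.inr rfl⟩
        · exact Or.inl hm
      · exact Or.inr ⟨t, by omega, ht2, ht3, ht4⟩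
    · rintro (hm | ⟨t, ht1, ht2, ht3, ht4⟩)
      · left
        split
        · rw [PySem.Set.mem_add, PySem.Set.mem_add]; exact Or.inl (Or.inl hm)
        · exact hm
      · rcases eq_or_lt_of_le ht1 with heq | hlt
        · subst heq
          left
          have hdvd : PySem.Int.mod diff s = 0 := (PySem.Int.mod_eq_zero_iff_dvd _ _).mpr ht3
          rw [dif_pos hdvd, PySem.Set.mem_add, PySem.Set.mem_add]
          rcases ht4 with rfl | rfl
          · exact Or.inl (Or.inr rfl)
          · exact Or.inr rfl
        · exact Or.inr ⟨t, by omega, ht2, ht3, ht4⟩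
  | case2 s acc h =>
    rw [bDivs, if_neg h]
    constructor
    · exact Or.inl
    · rintro (hm | ⟨t, ht1, ht2, ht3, _⟩)
      · exact hm
      · exfalso; nlinarith [mul_le_mul ht1 ht1 (by omega : (0:Int) ≤ s) (by omega : (0:Int) ≤ t)]

theorem mem_bDivs_iff (diff : Int) (hd : 0 < diff) (c : Int) :
    c ∈ bDivs diff 1 PySem.Set.empty ↔ c ∣ diff ∧ 1 ≤ c ∧ c ≤ diff := by
  rw [mem_bDivs diff 1 PySem.Set.empty c le_rfl]
  simp only [PySem.Set.empty, List.not_mem_nil, false_or]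
  constructor
  · rintro ⟨t, ht1, ht2, ht3, hc⟩
    obtain ⟨k, hk⟩ := ht3
    have hfd : PySem.Int.floordiv diff t = k := by
      rw [hk]; exact Int.mul_fdiv_cancel_left k (by omega)
    have hkpos : 1 ≤ k := by nlinarith
    rcases hc with rfl | rfl
    · exact ⟨⟨k, hk⟩, ht1, by nlinarith⟩
    · rw [hfd]
      exact ⟨⟨t, by rw [hk, mul_comm]⟩, hkpos, by nlinarith⟩
  · rintro ⟨⟨k, hk⟩, hc1, hc2⟩
    have hkpos : 1 ≤ k := by nlinarith
    by_cases hcc : c * c ≤ diff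
    · exact ⟨c, hc1, hcc, ⟨k, hk⟩, Or.inl rfl⟩
    · refine ⟨k, hkpos, by nlinarith, ⟨c, by rw [hk, mul_comm]⟩, Or.inr ?_⟩
      have : PySem.Int.floordiv diff k = c := by
        rw [show diff = k * c by rw [hk, mul_comm]]
        exact Int.mul_fdiv_cancel_left c (by omega)
      omega

theorem sorted_bDivs (diff : Int) (hd : 0 < diff) :
    PySem.List.sorted (bDivs diff 1 PySem.Set.empty) (fun v => v) false =
      (PySem.List.pyRange 1 (diff + 1)).filter (fun c => decide (c ∣ diff)) := by
  apply PySem.List.sorted_eq_of_perm_of_pairwise_lt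
  · apply List.perm_of_nodup_nodup_toFinset_eq
    · exact (PySem.List.nodup_pyRange_one 1 (diff + 1)).filter _
    · exact nodup_bDivs diff 1 PySem.Set.empty (by simp [PySem.Set.empty])
    · ext c
      simp only [List.mem_toFinset, List.mem_filter, PySem.List.mem_pyRange_one,
        mem_bDivs_iff diff hd c, decide_eq_true_eq]
      omega
  · exact (PySem.List.pairwise_lt_pyRange_one 1 (diff + 1)).filter _

theorem find_eq (diff n : Int) (hd : 0 < diff) :
    aFind diff n (PySem.List.pyRange 2 diff) =
      bFind diff n (PySem.List.sorted (bDivs diff 1 PySem.Set.empty) (fun v => v) false) := by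
  rw [aFind_eq_find?, bFind_eq_find?, sorted_bDivs diff hd]
  rw [← List.head?_filter, ← List.head?_filter, List.filter_filter]
  have heq : List.filter (fun i => decide (PySem.Int.mod diff i = 0 ∧ PySem.Int.floordiv diff i < n - 1)) (PySem.List.pyRange 2 diff) =
      List.filter (fun a => decide (2 ≤ a ∧ a < diff ∧ PySem.Int.floordiv diff a < n - 1) && decide (a ∣ diff)) (PySem.List.pyRange 1 (diff + 1)) := by
    apply asc_ext
    · exact (PySem.List.pairwise_lt_pyRange_one 2 diff).filter _
    · exact (PySem.List.pairwise_lt_pyRange_one 1 (diff + 1)).filter _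
    · intro c
      simp only [List.mem_filter, PySem.List.mem_pyRange_one, decide_eq_true_eq,
        Bool.and_eq_true, PySem.Int.mod_eq_zero_iff_dvd]
      constructor
      · rintro ⟨⟨hc1, hc2⟩, hdvd, hfd⟩
        exact ⟨⟨by omega, by omega⟩, ⟨by omega, by omega, hfd⟩, hdvd⟩
      · rintro ⟨⟨hc1, hc2⟩, ⟨h2, hlt, hfd⟩, hdvd⟩
        exact ⟨⟨by omega, by omega⟩, hdvd, hfd⟩
  rw [heq]

theorem find_cases (diff n : Int) :
    aFind diff n (PySem.List.pyRange 2 diff) = diff ∨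
      2 ≤ aFind diff n (PySem.List.pyRange 2 diff) := by
  rw [aFind_eq_find?]
  cases hf : (PySem.List.pyRange 2 diff).find? (fun i => decide (PySem.Int.mod diff i = 0 ∧ PySem.Int.floordiv diff i < n - 1)) with
  | none => exact Or.inl rfl
  | some c =>
    right
    have hmem := List.mem_of_find?_eq_some hf
    rw [PySem.List.mem_pyRange_one] at hmem
    simpa using hmem.1

theorem branch1 (n x y : Int) (hn : 2 < n)
    (hmod : PySem.Int.mod (y - x) (n - 1) = 0) :
    [x] ++ (PySem.List.pyRange 0 (n - 2)).map
        (fun i => x + PySem.Int.floordiv (y - x) (n - 1) * (i + 1)) ++ [y] =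
      (PySem.List.pyRange 0 n).map (fun i => x + PySem.Int.floordiv (y - x) (n - 1) * i) := by
  have hkey : PySem.Int.floordiv (y - x) (n - 1) * (n - 1) = y - x := by
    have := PySem.Int.floordiv_mul_add_mod (y - x) (n - 1)
    omega
  have hsing : PySem.List.pyRange (n - 1) n = [n - 1] := by
    have h := PySem.List.pyRange_one_singleton (n - 1)
    rw [show n - 1 + 1 = n by ring] at h
    exact h
  rw [PySem.List.pyRange_one_append 0 1 n (by omega) (by omega),
      PySem.List.pyRange_one_append 1 (n - 1) n (by omega) (by omega),
      show PySem.List.pyRange 0 1 = [0] from by decide, hsing]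
  simp only [List.map_append, List.map_cons, List.map_nil, List.append_assoc]
  congr 1
  · simp
  congr 1
  · rw [PySem.List.pyRange_one 1 (n - 1), PySem.List.pyRange_one 0 (n - 2),
      List.map_map, List.map_map,
      show (n - 1 - 1).toNat = (n - 2 - 0).toNat by omega]
    apply List.map_congr_left
    intro k _
    simp only [Function.comp_apply]
    ring
  · simp only [List.cons_eq_cons, and_true]
    linarith [hkey]

theorem min_inner (n x d : Int) (hn : 2 < n) (hd : 0 < d) :
    (PySem.List.min? ((PySem.List.pyRange 0 n).map (fun i => x + d * i)) (fun v => v)).getD 0 = x := by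
  obtain ⟨m, hm⟩ : ∃ m, PySem.List.min? ((PySem.List.pyRange 0 n).map (fun i => x + d * i)) (fun v => v) = some m := by
    cases hc : PySem.List.min? ((PySem.List.pyRange 0 n).map (fun i => x + d * i)) (fun v => v) with
    | none =>
      exfalso
      rw [PySem.List.min?_eq_none_iff] at hc
      have : (0 : Int) ∈ PySem.List.pyRange 0 n := PySem.List.mem_pyRange_one.mpr ⟨le_rfl, by omega⟩
      simp [List.map_eq_nil_iff] at hc
      rw [hc] at this
      simp at this
    | some m => exact ⟨m, rfl⟩
  rw [hm]
  have hmem := PySem.List.min?_mem hm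
  have hmin := PySem.List.min?_isMin hm
  simp only [List.mem_map] at hmem
  obtain ⟨i, hi, rfl⟩ := hmem
  rw [PySem.List.mem_pyRange_one] at hi
  simp only [Option.getD_some]
  have h1 : x + d * 0 ∈ (PySem.List.pyRange 0 n).map (fun i => x + d * i) :=
    List.mem_map.mpr ⟨0, PySem.List.mem_pyRange_one.mpr ⟨le_rfl, by omega⟩, rfl⟩
  have h2 := hmin _ h1
  have : x ≤ x + d * i := by nlinarith
  simp only [mul_zero, add_zero] at h2
  omega

-- Python (x - 1) % d for positive d, in terms of x % d
theorem mod_sub_one (x d : Int) (hd : 0 < d) :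
    PySem.Int.mod (x - 1) d = if PySem.Int.mod x d = 0 then d - 1 else PySem.Int.mod x d - 1 := by
  have h1 := PySem.Int.floordiv_mul_add_mod x d
  have hr0 := PySem.Int.mod_nonneg x hd
  have hr1 := PySem.Int.mod_lt x hd
  rw [PySem.Int.mod_eq_emod_of_pos hd]
  split
  · rename_i h0
    have hx : x - 1 = (d - 1) + d * (PySem.Int.floordiv x d - 1) := by
      rw [h0] at h1; linarith
    rw [hx, Int.add_mul_emod_self_left, Int.emod_eq_of_lt (by omega) (by omega)]
  · rename_i h0
    have hx : x - 1 = (PySem.Int.mod x d - 1) + d * PySem.Int.floordiv x d := by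
      linarith
    rw [hx, Int.add_mul_emod_self_left, Int.emod_eq_of_lt (by omega) (by omega)]

-- 'if shift: return [i - diff*shift for i in inner_list]; return inner_list' as one map
theorem shift_map (n x d sh base : Int) (hb : x - d * sh = base) :
    (if sh ≠ 0 then ((PySem.List.pyRange 0 n).map (fun i => x + d * i)).map (fun v => v - d * sh)
     else (PySem.List.pyRange 0 n).map (fun i => x + d * i)) =
      (PySem.List.pyRange 0 n).map (fun i => base + d * i) := by
  split
  · rw [List.map_map]
    apply List.map_congr_left
    intro i _
    simp only [Function.comp_apply]
    linarith
  · rename_i hsh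
    rw [not_not] at hsh
    rw [hsh, mul_zero, sub_zero] at hb
    apply List.map_congr_left
    intro i _
    linarith

-- the else-branch tails agree once both searches returned the same positive d
theorem else_eq (n x d : Int) (hn : 2 < n) (hd : 0 < d) :
    (if PySem.Int.floordiv ((PySem.List.min? ((PySem.List.pyRange 0 n).map (fun i => x + d * i)) (fun v => v)).getD 0) d -
          (if PySem.Int.mod x d = 0 then 1 else 0) ≠ 0
     then ((PySem.List.pyRange 0 n).map (fun i => x + d * i)).map
        (fun v => v - d * (PySem.Int.floordiv ((PySem.List.min? ((PySem.List.pyRange 0 n).map (fun i => x + d * i)) (fun v => v)).getD 0) d -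
          (if PySem.Int.mod x d = 0 then 1 else 0)))
     else (PySem.List.pyRange 0 n).map (fun i => x + d * i)) =
    (PySem.List.pyRange 0 n).map (fun i => PySem.Int.mod (x - 1) d + 1 + d * i) := by
  rw [min_inner n x d hn hd]
  have h1 := PySem.Int.floordiv_mul_add_mod x d
  have harith : x - d * (PySem.Int.floordiv x d - (if PySem.Int.mod x d = 0 then 1 else 0)) =
      PySem.Int.mod (x - 1) d + 1 := by
    rw [mod_sub_one x d hd]
    by_cases hm : PySem.Int.mod x d = 0
    · rw [if_pos hm, if_pos hm]; rw [hm] at h1; linarith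
    · rw [if_neg hm, if_neg hm]; linarith
  exact shift_map n x d _ _ harith

-- ===== VERDICT (by name: the statement is the Claim_ definition above) =====
theorem get_array_spec : Claim_equal_get_array := by
  unfold Claim_equal_get_array Spec_get_array
  intro n x y _ hpre
  by_cases hn : n > 2
  · simp only [get_array, get_array_alt, if_pos hn, if_neg (by omega : ¬ n ≤ 2)]
    by_cases hmod : PySem.Int.mod (y - x) (n - 1) = 0
    · simp only [if_pos hmod]
      exact branch1 n x y hn hmod
    · simp only [if_neg hmod]
      have hxy : x ≤ y := by
        rcases hpre with h | h | h
        · omega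
        · exact h
        · exact absurd h hmod
      have hdiff : 0 < y - x := by
        rcases lt_or_eq_of_le hxy with h | h
        · omega
        · exfalso
          apply hmod
          rw [← h, sub_self]
          exact (PySem.Int.mod_eq_zero_iff_dvd 0 (n - 1)).mpr (dvd_zero _)
      rw [← find_eq (y - x) n hdiff]
      have hd : 0 < aFind (y - x) n (PySem.List.pyRange 2 (y - x)) := by
        rcases find_cases (y - x) n with h | h <;> omega
      exact else_eq n x (aFind (y - x) n (PySem.List.pyRange 2 (y - x))) hn hd
  · simp only [get_array, get_array_alt, if_neg hn, if_pos (by omega : n ≤ 2)]
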